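-- pv_equiv track=rewrite | github.com/alessandrofd/leetcode-python | 1658a-minimum-operations-to-reduce-x-to-zero.py | minOperations_dict
-- ===== SOURCE A (Python) =====
-- def minOperations_dict(nums: list[int], x: int) -> int:
--     """
--     Ao invés de tentar as combinações no início e no final no array,
--     nós tentamos descobrir qual o maior subarray cuja somatória de seus valores é
--     a diferença entre o parâmetro x e a somatória de todos os elementos do vetor.
--     Este será o nosso valor alvo.
--
--     Percorremos o vetor totalizando os seus valores. Como o percorremos da
--     esquerda para a direita, podemos considerar que cada iteração corresponde a
--     uma supressão, cada vez menor, de elementos à direita. Utilizamos uma mapa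
--     para armazenar o índice das somas parciais do vetor. A cada passo testamos se
--     já houve uma soma parcial anterior que quando subtraída da soma atual
--     corresponde ao valor alvo. Caso o teste seja possitivo, o valor armazenado no
--     mapa corresponderá aos elementos à esquerda a serem eliminados. Por outro
--     lado, o próprio índice da iteração marca o limite do subarray, ou seja, os
--     elementos à direita não devem ser considerados para que obtenhamos o valor
--     desejado.
--
--     Como é possível que haja mais de um subarray cuja soma de valores seja igual
--     ao valor que procuramos, devemos percorrer todo vetor. Toda vez que acharmos
--     um subarray válido, devemos testar se o seu comprimento é maior que os dos
--     demais subarrays válidos. O seu comprimento será igual ao índice da iteração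
--     menos os elementos à esquerda a serem eliminado - valor armazenado no mapa.
--     """
--     n = len(nums)
--     total = sum(nums)
--     if total == x:
--         return n
--
--     target = total - x
--     index_by_sum = {}
--     index_by_sum[0] = -1
--
--     prefix_sum = 0
--     max_len = 0
--     for i, num in enumerate(nums):
--         prefix_sum += num
--         if prefix_sum - target in index_by_sum:
--             max_len = max(max_len, i - index_by_sum[prefix_sum - target])
--         index_by_sum[prefix_sum] = i
--
--     if max_len == 0:
--         return -1
--     return n - max_len
-- ===== SOURCE B (Python) =====
-- def minOperations_dict(nums: list[int], x: int) -> int: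
--     # For each end index i, scan backwards and take the nearest start whose
--     # suffix-sum equals target (= the shortest such subarray ending at i),
--     # then keep the longest over all i.  No hash map, no prefix-sum table.
--     n = len(nums)
--     total = sum(nums)
--     if total == x:
--         return n
--     target = total - x
--     best = 0
--     for i in range(n):
--         s = 0
--         for j in range(i, -1, -1):
--             s += nums[j]
--             if s == target:
--                 best = max(best, i - j + 1)
--                 break
--     return -1 if best == 0 else n - best
-- ===== Notes on version B (the rewrite author's own statement) =====
-- stated objective: alternative
-- what changed: Replaces the prefix-sum hash map with a direct per-end-index backward scan that stops at the nearest start whose suffix sums to target, keeping the longest such length; no dictionary or prefix-sum table is maintained.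
import Mathlib
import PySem

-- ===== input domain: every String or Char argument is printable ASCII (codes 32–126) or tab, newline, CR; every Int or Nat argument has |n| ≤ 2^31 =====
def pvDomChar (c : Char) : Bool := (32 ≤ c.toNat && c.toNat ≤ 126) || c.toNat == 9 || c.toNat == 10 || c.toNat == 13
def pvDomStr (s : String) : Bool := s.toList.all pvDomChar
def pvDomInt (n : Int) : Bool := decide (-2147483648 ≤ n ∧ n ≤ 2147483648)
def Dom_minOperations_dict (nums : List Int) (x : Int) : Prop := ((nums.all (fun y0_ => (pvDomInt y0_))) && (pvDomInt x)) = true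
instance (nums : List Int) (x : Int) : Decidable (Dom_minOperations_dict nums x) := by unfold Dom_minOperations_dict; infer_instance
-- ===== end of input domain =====

-- B replaces A's prefix-sum hash map with a per-end-index backward scan (break at the
-- nearest matching start); same return value everywhere, no speed claim (B is the naive scan).

-- ===== PORT A =====
def minOperations_dict (nums : List Int) (x : Int) : Int :=
  let n : Int := nums.length
  let total : Int := nums.sum
  if total = x then n
  else
    let target := total - x
    let indexBySum : PySem.Dict Int Int := (PySem.Dict.empty).insert 0 (-1)
    let st :=
      (PySem.List.enumerate nums).foldl
        (fun (st : Int × Int × PySem.Dict Int Int) (p : Int × Int) =>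
          let prefixSum := st.1 + p.2
          let maxLen :=
            match st.2.2.get? (prefixSum - target) with
            | some j => max st.2.1 (p.1 - j)
            | none => st.2.1
          (prefixSum, maxLen, st.2.2.insert prefixSum p.1))
        (0, 0, indexBySum)
    if st.2.1 = 0 then -1 else n - st.2.1

-- ===== PORT B =====
-- inner 'for j in range(i, -1, -1): s += nums[j]; if s == target: …; break'
-- (nums.getD j 0 is nums[j]; every use has j < nums.length)
def pvBscan (nums : List Int) (target i s : Int) (j : Nat) : Option Int :=
  let s' := s + nums.getD j 0
  if s' = target then some (i - (j : Int) + 1)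
  else
    match j with
    | 0 => none
    | j' + 1 => pvBscan nums target i s' j'

def minOperations_dict_alt (nums : List Int) (x : Int) : Int :=
  let n : Int := nums.length
  let total : Int := nums.sum
  if total = x then n
  else
    let target := total - x
    let best :=
      (List.range nums.length).foldl
        (fun (best : Int) (i : Nat) =>
          match pvBscan nums target (i : Int) 0 i with
          | some len => max best len
          | none => best)
        0
    if best = 0 then -1 else n - best

-- ===== PRECONDITION & SPEC =====
def Spec_minOperations_dict (nums : List Int) (x : Int) (out : Int) : Prop := out = minOperations_dict_alt nums x
instance (nums : List Int) (x : Int) (out : Int) : Decidable (Spec_minOperations_dict nums x out) := by unfold Spec_minOperations_dict; infer_instance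

-- ===== CLAIM (what is proved, stated in full; the proofs are below) =====
def Claim_equal_minOperations_dict : Prop := ∀ (nums : List Int) (x : Int), Dom_minOperations_dict nums x → Spec_minOperations_dict nums x (minOperations_dict nums x)

-- ===== LEMMAS AND PROOFS =====

-- prefix sum of the first k elements
def preS (nums : List Int) (k : Nat) : Int := (nums.take k).sum

-- largest m ≤ j with preS nums m = v
def lastLe (nums : List Int) (v : Int) : Nat → Option Nat
  | 0 => if preS nums 0 = v then some 0 else none
  | j + 1 => if preS nums (j + 1) = v then some (j + 1) else lastLe nums v j

-- the common value of A's max_len / B's best after processing the first k indices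
def bestUpTo (nums : List Int) (target : Int) : Nat → Int
  | 0 => 0
  | i + 1 =>
    match lastLe nums (preS nums (i + 1) - target) i with
    | some m => max (bestUpTo nums target i) ((i : Int) - ((m : Int) - 1))
    | none => bestUpTo nums target i

theorem getD_eq_getElem' (nums : List Int) (k : Nat) (hk : k < nums.length) :
    nums.getD k 0 = nums[k] := by
  simp [List.getD, List.getElem?_eq_getElem hk]

theorem take_succ_eq (nums : List Int) (k : Nat) (hk : k < nums.length) :
    nums.take (k + 1) = nums.take k ++ [nums[k]] := by
  rw [List.take_add_one, List.getElem?_eq_getElem hk]; rfl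

theorem preS_succ (nums : List Int) (k : Nat) (hk : k < nums.length) :
    preS nums (k + 1) = preS nums k + nums.getD k 0 := by
  rw [preS, take_succ_eq nums k hk, List.sum_append, getD_eq_getElem' nums k hk]
  simp [preS]

theorem pvBscan_eq (nums : List Int) (target i S : Int) :
    ∀ j : Nat, j < nums.length →
      pvBscan nums target i (S - preS nums (j + 1)) j
        = (lastLe nums (S - target) j).map (fun m => i - (m : Int) + 1) := by
  intro j
  induction j with
  | zero =>
    intro hj
    have h1 : preS nums 1 = preS nums 0 + nums.getD 0 0 := preS_succ nums 0 hj
    have h0 : preS nums 0 = 0 := by simp [preS]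
    simp only [pvBscan, lastLe, h0]
    have hS : S - preS nums 1 + nums.getD 0 0 = S := by rw [h1, h0]; ring
    rw [hS]
    by_cases h : S = target
    · simp [h]
    · have h' : ¬ ((0 : Int) = S - target) := by omega
      simp [h, h']
  | succ j' ih =>
    intro hj
    have hj' : j' < nums.length := by omega
    have h1 : preS nums (j' + 1 + 1) = preS nums (j' + 1) + nums.getD (j' + 1) 0 :=
      preS_succ nums (j' + 1) hj
    simp only [pvBscan]
    have hs : S - preS nums (j' + 1 + 1) + nums.getD (j' + 1) 0 = S - preS nums (j' + 1) := by
      rw [h1]; ring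
    rw [hs]
    by_cases h : preS nums (j' + 1) = S - target
    · have h2 : S - preS nums (j' + 1) = target := by omega
      simp [lastLe, h]
    · have h2 : ¬ (S - preS nums (j' + 1) = target) := by omega
      simp only [lastLe, h2, if_false, h, if_false]
      exact ih hj'

-- A's loop body, named for the proofs (definitionally the lambda in the port)
def stepA (target : Int) (st : Int × Int × PySem.Dict Int Int) (p : Int × Int) :
    Int × Int × PySem.Dict Int Int :=
  let prefixSum := st.1 + p.2
  let maxLen :=
    match st.2.2.get? (prefixSum - target) with
    | some j => max st.2.1 (p.1 - j)
    | none => st.2.1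
  (prefixSum, maxLen, st.2.2.insert prefixSum p.1)

-- A's loop invariant, by induction over the processed prefix
theorem foldA_inv (nums : List Int) (target : Int) :
    ∀ k : Nat, k ≤ nums.length →
      ((PySem.List.enumerate (nums.take k)).foldl (stepA target)
          (0, 0, (PySem.Dict.empty).insert 0 (-1))).1 = preS nums k ∧
      ((PySem.List.enumerate (nums.take k)).foldl (stepA target)
          (0, 0, (PySem.Dict.empty).insert 0 (-1))).2.1 = bestUpTo nums target k ∧
      ∀ v, ((PySem.List.enumerate (nums.take k)).foldl (stepA target)
          (0, 0, (PySem.Dict.empty).insert 0 (-1))).2.2.get? v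
            = (lastLe nums v k).map (fun m => (m : Int) - 1) := by
  intro k
  induction k with
  | zero =>
    intro _
    simp only [List.take_zero, PySem.List.enumerate_nil, List.foldl_nil]
    refine ⟨by simp [preS], by simp [bestUpTo], ?_⟩
    intro v
    rw [PySem.Dict.get?_insert]
    by_cases hv : v = 0
    · have h0 : preS nums 0 = v := by simp [preS, hv]
      simp [hv, lastLe, h0]
    · have h0 : ¬ (preS nums 0 = v) := by simp [preS]; omega
      simp [hv, lastLe, h0, PySem.Dict.get?_empty]
  | succ k ih =>
    intro hk
    have hklt : k < nums.length := by omega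
    obtain ⟨h1, h2, h3⟩ := ih (by omega)
    rw [take_succ_eq nums k hklt, PySem.List.enumerate_append, List.foldl_append]
    simp only [PySem.List.enumerate_cons, PySem.List.enumerate_nil, List.foldl_cons,
      List.foldl_nil, List.length_take]
    have hmin : min k nums.length = k := by omega
    rw [hmin]
    set st := (PySem.List.enumerate (nums.take k)).foldl (stepA target)
      (0, 0, (PySem.Dict.empty).insert 0 (-1)) with hst
    have hpre : st.1 + nums[k] = preS nums (k + 1) := by
      rw [h1, preS_succ nums k hklt, getD_eq_getElem' nums k hklt]
    have hidx : (0 : Int) + (k : Nat) = (k : Nat) := by ring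
    refine ⟨?_, ?_, ?_⟩
    · show st.1 + nums[k] = _
      rw [hpre]
    · show (match st.2.2.get? (st.1 + nums[k] - target) with
        | some j => max st.2.1 ((0 : Int) + (k : Nat) - j)
        | none => st.2.1) = bestUpTo nums target (k + 1)
      rw [hpre, h2, h3 (preS nums (k + 1) - target), hidx]
      cases hL : lastLe nums (preS nums (k + 1) - target) k with
      | none => simp [bestUpTo, hL]
      | some m => simp [bestUpTo, hL]
    · intro v
      show ((st.2.2.insert (st.1 + nums[k]) ((0 : Int) + (k : Nat))).get? v) = _
      rw [hpre, hidx, PySem.Dict.get?_insert]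
      by_cases hv : v = preS nums (k + 1)
      · have hL : lastLe nums v (k + 1) = some (k + 1) := by simp [lastLe, hv]
        rw [if_pos hv, hL]
        simp
      · have hL : lastLe nums v (k + 1) = lastLe nums v k := by
          have h' : ¬ (preS nums (k + 1) = v) := fun h => hv h.symm
          simp [lastLe, h']
        rw [if_neg hv, hL, h3 v]

-- B's loop, by induction over the range bound
theorem foldB_eq (nums : List Int) (target : Int) :
    ∀ k : Nat, k ≤ nums.length →
      (List.range k).foldl
        (fun (best : Int) (i : Nat) =>
          match pvBscan nums target (i : Int) 0 i with
          | some len => max best len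
          | none => best)
        0 = bestUpTo nums target k := by
  intro k
  induction k with
  | zero => intro _; simp [bestUpTo]
  | succ k ih =>
    intro hk
    have hklt : k < nums.length := by omega
    rw [List.range_succ, List.foldl_append, ih (by omega)]
    simp only [List.foldl_cons, List.foldl_nil]
    have h0 : (0 : Int) = preS nums (k + 1) - preS nums (k + 1) := by ring
    rw [h0, pvBscan_eq nums target (k : Int) (preS nums (k + 1)) k hklt]
    cases hL : lastLe nums (preS nums (k + 1) - target) k with
    | none => simp [bestUpTo, hL]
    | some m =>
      have heq : (k : Int) - (m : Int) + 1 = (k : Int) - ((m : Int) - 1) := by ring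
      simp [bestUpTo, hL, heq]

-- ===== VERDICT (by name: the statement is the Claim_ definition above) =====
theorem minOperations_dict_spec : Claim_equal_minOperations_dict := by
  intro nums x _
  unfold Spec_minOperations_dict minOperations_dict minOperations_dict_alt
  by_cases htot : nums.sum = x
  · simp [htot]
  · simp only [htot, if_false]
    have hA := (foldA_inv nums (nums.sum - x) nums.length (le_refl _)).2.1
    rw [List.take_length] at hA
    have hB := foldB_eq nums (nums.sum - x) nums.length (le_refl _)
    have hsame : (fun (st : Int × Int × PySem.Dict Int Int) (p : Int × Int) =>
        let prefixSum := st.1 + p.2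
        let maxLen :=
          match st.2.2.get? (prefixSum - (nums.sum - x)) with
          | some j => max st.2.1 (p.1 - j)
          | none => st.2.1
        (prefixSum, maxLen, st.2.2.insert prefixSum p.1)) = stepA (nums.sum - x) := rfl
    rw [hsame, hA, hB]
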